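-- pv_equiv track=rewrite | github.com/tdodson0612/Algorithm-Visualizer | algo_visualizer.py | generate_prefix_steps
-- ===== SOURCE A (Python) =====
-- def generate_prefix_steps(arr):
--     steps = []
--     prefix = []
--     total = 0
--     for i, num in enumerate(arr):
--         total += num
--         prefix.append(total)
--         steps.append(([i], prefix[:]))
--     return steps
-- ===== SOURCE B (Python) =====
-- def prefix_upto(arr, i):
--     # Prefix sums of arr[0..i], computed from scratch by indexing.
--     snap = []
--     s = 0
--     for j in range(i + 1):
--         s += arr[j]
--         snap.append(s)
--     return snap
--
-- def generate_prefix_steps(arr):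
--     # Each snapshot is recomputed independently from the raw input; no
--     # running state is shared between steps (unlike A's incremental pass).
--     return [([i], prefix_upto(arr, i)) for i in range(len(arr))]
-- ===== Notes on version B (the rewrite author's own statement) =====
-- stated objective: alternative
-- what changed: A makes one incremental pass maintaining a running total and a growing prefix list that it copies at each step; B keeps no state across steps and instead recomputes each snapshot independently with a fresh inner indexed scan over arr[0..i].
import Mathlib
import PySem

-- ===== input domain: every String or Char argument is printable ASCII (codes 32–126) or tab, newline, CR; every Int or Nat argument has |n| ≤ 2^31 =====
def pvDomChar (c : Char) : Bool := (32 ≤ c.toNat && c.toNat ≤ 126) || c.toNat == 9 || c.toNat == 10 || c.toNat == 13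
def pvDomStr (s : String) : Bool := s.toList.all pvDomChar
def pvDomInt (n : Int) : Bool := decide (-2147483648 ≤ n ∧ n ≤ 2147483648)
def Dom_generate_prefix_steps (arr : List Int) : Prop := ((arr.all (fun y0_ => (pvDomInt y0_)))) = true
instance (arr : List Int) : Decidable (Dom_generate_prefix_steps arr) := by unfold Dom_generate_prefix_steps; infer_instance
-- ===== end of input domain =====

-- B recomputes every snapshot independently from arr[:i+1] instead of A's single stateful pass (objective: alternative).
-- ===== PORT A =====
def generate_prefix_steps (arr : List Int) : List (List Int × List Int) :=
  (((PySem.List.enumerate arr 0).foldl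
      (fun (st : List (List Int × List Int) × List Int × Int) p =>
        let total := st.2.2 + p.2
        let pfx := st.2.1 ++ [total]
        (st.1 ++ [([p.1], pfx)], pfx, total))
      ([], [], 0))).1

-- ===== PORT B =====
-- prefix_upto: fresh inner scan 'for j in range(i+1): s += arr[j]'.
-- arr[j] is always in range at every call site (j ≤ i < len arr), so the .getD 0 default is never taken.
def pvPrefixUpto (arr : List Int) (i : Int) : List Int :=
  ((PySem.List.pyRange 0 (i + 1) 1).foldl
      (fun (st : List Int × Int) j =>
        let v := (PySem.List.pyGet? arr j).getD 0
        (st.1 ++ [st.2 + v], st.2 + v)) ([], 0)).1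

def generate_prefix_steps_alt (arr : List Int) : List (List Int × List Int) :=
  (PySem.List.pyRange 0 (PySem.List.len arr) 1).map (fun i => ([i], pvPrefixUpto arr i))

-- ===== PRECONDITION & SPEC =====
def Spec_generate_prefix_steps (arr : List Int) (out : List (List Int × List Int)) : Prop := out = generate_prefix_steps_alt arr
instance (arr : List Int) (out : List (List Int × List Int)) : Decidable (Spec_generate_prefix_steps arr out) := by unfold Spec_generate_prefix_steps; infer_instance

-- ===== CLAIM (what is proved, stated in full; the proofs are below) =====
def Claim_equal_generate_prefix_steps : Prop := ∀ (arr : List Int), Dom_generate_prefix_steps arr → Spec_generate_prefix_steps arr (generate_prefix_steps arr)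

-- ===== LEMMAS AND PROOFS =====
-- proof-only helper: the scanl of prefix sums starting from a running total
def pvAccum (arr : List Int) (run : Int) : List Int :=
  match arr with
  | [] => []
  | x :: xs => (run + x) :: pvAccum xs (run + x)

lemma fold_A (arr : List Int) (s : Int) (t : Int) (stp : List (List Int × List Int)) (pfx : List Int) :
    (((PySem.List.enumerate arr s).foldl
        (fun (st : List (List Int × List Int) × List Int × Int) p =>
          let total := st.2.2 + p.2
          let pfx := st.2.1 ++ [total]
          (st.1 ++ [([p.1], pfx)], pfx, total))
        (stp, pfx, t))).1
    = stp ++ (List.range arr.length).map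
        (fun (k : Nat) => ([s + (k : Int)], pfx ++ (pvAccum arr t).take (k + 1))) := by
  induction arr generalizing s t stp pfx with
  | nil => simp [PySem.List.enumerate_nil]
  | cons x xs ih =>
      rw [PySem.List.enumerate_cons, List.foldl_cons, ih]
      simp only [pvAccum, List.length_cons, List.range_succ_eq_map, List.map_cons, List.map_map,
        List.take_succ_cons, Nat.cast_zero, add_zero, List.take_zero]
      rw [List.append_assoc, List.singleton_append]
      congr 2
      apply List.map_congr_left
      intro k _
      simp only [Function.comp_apply, Nat.succ_eq_add_one, Prod.mk.injEq]
      constructor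
      · push_cast; ring_nf
      · simp

lemma pvAccum_append_singleton (l : List Int) (x r : Int) :
    pvAccum (l ++ [x]) r = pvAccum l r ++ [r + l.sum + x] := by
  induction l generalizing r with
  | nil => simp [pvAccum]
  | cons y ys ih => simp [pvAccum, ih, add_assoc]

lemma fold_B_pair (arr : List Int) (m : Nat) (hm : m ≤ arr.length) :
    (PySem.List.pyRange 0 (m : Int) 1).foldl
        (fun (st : List Int × Int) j =>
          (st.1 ++ [st.2 + (PySem.List.pyGet? arr j).getD 0],
           st.2 + (PySem.List.pyGet? arr j).getD 0)) ([], 0)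
      = (pvAccum (arr.take m) 0, (arr.take m).sum) := by
  induction m with
  | zero => simp [PySem.List.pyRange_one_eq_nil, pvAccum]
  | succ m ih =>
      have hm' : m < arr.length := hm
      have hr : ((m + 1 : Nat) : Int) = (m : Int) + 1 := by push_cast; ring
      rw [hr, PySem.List.pyRange_one_succ_right (Int.natCast_nonneg m), List.foldl_append,
        ih (Nat.le_of_lt hm')]
      simp only [List.foldl_cons, List.foldl_nil, PySem.List.pyGet?_natCast,
        List.getElem?_eq_getElem hm', Option.getD_some]
      have ht : List.take (m + 1) arr = List.take m arr ++ [arr[m]] := by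
        rw [List.take_succ, List.getElem?_eq_getElem hm']
        simp
      rw [ht, pvAccum_append_singleton, List.sum_append]
      simp

lemma pvAccum_take (arr : List Int) (r : Int) (m : Nat) :
    pvAccum (arr.take m) r = (pvAccum arr r).take m := by
  induction arr generalizing r m with
  | nil => simp [pvAccum]
  | cons x xs ih =>
      cases m with
      | zero => simp [pvAccum]
      | succ m => simp [pvAccum, ih]

lemma pvPrefixUpto_eq (arr : List Int) (k : Nat) (hk : k < arr.length) :
    pvPrefixUpto arr (k : Int) = (pvAccum arr 0).take (k + 1) := by
  unfold pvPrefixUpto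
  have h1 : ((k : Int) + 1) = ((k + 1 : Nat) : Int) := by push_cast; ring
  rw [h1, fold_B_pair arr (k + 1) hk]
  exact pvAccum_take arr 0 (k + 1)

-- ===== VERDICT (by name: the statement is the Claim_ definition above) =====
theorem generate_prefix_steps_spec : Claim_equal_generate_prefix_steps := by
  intro arr _
  unfold Spec_generate_prefix_steps generate_prefix_steps generate_prefix_steps_alt
  rw [fold_A]
  simp only [PySem.List.len_eq, PySem.List.pyRange_one, Int.sub_zero, Int.toNat_natCast,
    List.map_map]
  apply List.map_congr_left
  intro k hk
  simp only [List.mem_range] at hk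
  simp only [Function.comp, Int.zero_add, pvPrefixUpto_eq arr k hk]
  simp
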